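-- pv_equiv track=rewrite | github.com/younes-nb/sparse-matrix | venv/Model.py | sum
-- ===== SOURCE A (Python) =====
-- def sum(firstMatrix=list, secondMatrix=list):
--     result = []
--     i, j = 0, 0
--
--     while i < firstMatrix.__len__() and j < secondMatrix.__len__():
--
--         if firstMatrix[i][0] < secondMatrix[j][0]:
--             result.append(firstMatrix[i])
--             i += 1
--
--         elif firstMatrix[i][0] > secondMatrix[j][0]:
--             result.append(secondMatrix[j])
--             j += 1
--
--         else:
--
--             if firstMatrix[i][1] < secondMatrix[j][1]:
--                 result.append(firstMatrix[i])
--                 i += 1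
--
--             elif firstMatrix[i][1] > secondMatrix[j][1]:
--                 result.append(secondMatrix[j])
--                 j += 1
--
--             else:
--
--                 if firstMatrix[i][2] + secondMatrix[j][2] != 0:
--                     result.append((firstMatrix[i][0], firstMatrix[i][1], firstMatrix[i][2] + secondMatrix[j][2]))
--                 i += 1
--                 j += 1
--
--     while i < firstMatrix.__len__():
--         result.append(firstMatrix[i])
--         i += 1
--
--     while j < secondMatrix.__len__():
--         result.append(secondMatrix[j])
--         j += 1
--
--     return result
-- ===== SOURCE B (Python) =====
-- def split_run(entries, bound):
--     """Split off the longest prefix whose (row, col) keys are lexicographically below bound."""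
--     n = 0
--     while n < len(entries) and (entries[n][0], entries[n][1]) < bound:
--         n += 1
--     return entries[:n], entries[n:]
--
--
-- def sum(firstMatrix=list, secondMatrix=list):
--     # Fold over the second matrix only, threading the unconsumed remainder of the
--     # first matrix as state; whole key-runs are spliced in one slice per step.
--     out = []
--     rest = list(firstMatrix)
--     for y in secondMatrix:
--         yk = (y[0], y[1])
--         run, rest = split_run(rest, yk)
--         out += run
--         if rest and (rest[0][0], rest[0][1]) == yk:
--             v = rest[0][2] + y[2]
--             if v != 0:
--                 out.append((y[0], y[1], v))
--             rest = rest[1:]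
--         else:
--             out.append(y)
--     return out + rest
-- ===== Notes on version B (the rewrite author's own statement) =====
-- stated objective: alternative
-- what changed: Replaces A's symmetric two-index merge (one main while loop with nested coordinate branches plus two flush loops) with a fold over the second matrix alone: the unconsumed remainder of the first matrix is threaded as state, a helper splits off the whole run of first-matrix entries keyed below the current second entry in one slice, and the leftover remainder is appended wholesale at the end.
import Mathlib
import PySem

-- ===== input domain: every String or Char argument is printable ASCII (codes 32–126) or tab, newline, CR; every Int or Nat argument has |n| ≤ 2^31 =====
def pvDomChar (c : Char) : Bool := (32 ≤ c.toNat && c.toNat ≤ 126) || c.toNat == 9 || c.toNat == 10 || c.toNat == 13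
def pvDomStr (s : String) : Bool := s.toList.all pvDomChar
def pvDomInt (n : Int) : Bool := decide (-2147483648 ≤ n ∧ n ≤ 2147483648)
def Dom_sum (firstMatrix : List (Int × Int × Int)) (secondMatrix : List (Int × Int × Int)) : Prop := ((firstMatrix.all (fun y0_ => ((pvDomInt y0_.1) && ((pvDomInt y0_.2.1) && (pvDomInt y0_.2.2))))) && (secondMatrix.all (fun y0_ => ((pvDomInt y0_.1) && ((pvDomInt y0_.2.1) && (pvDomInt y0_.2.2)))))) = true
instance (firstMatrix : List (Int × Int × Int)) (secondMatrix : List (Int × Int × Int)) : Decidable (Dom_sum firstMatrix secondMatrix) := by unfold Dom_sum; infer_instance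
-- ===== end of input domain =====

-- B folds over the second matrix only, threading the remainder of the first as state and
-- splicing whole key-runs by slices; same return value on every input, different decomposition.

-- ===== PORT A =====
-- trailing 'while i < len(xs): result.append(xs[i]); i += 1'
def sumTailA (xs : List (Int × Int × Int)) (i : Nat) (result : List (Int × Int × Int)) : List (Int × Int × Int) :=
  if h : i < xs.length then sumTailA xs (i + 1) (result ++ [xs[i]]) else result
termination_by xs.length - i

-- the main 'while i < len and j < len' loop; on exit it runs the two tail loops in sequence
def sumLoopA (fm sm : List (Int × Int × Int)) (i j : Nat) (result : List (Int × Int × Int)) : List (Int × Int × Int) :=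
  if h : i < fm.length ∧ j < sm.length then
    let x := fm[i]'h.1
    let y := sm[j]'h.2
    if x.1 < y.1 then sumLoopA fm sm (i + 1) j (result ++ [x])
    else if x.1 > y.1 then sumLoopA fm sm i (j + 1) (result ++ [y])
    else if x.2.1 < y.2.1 then sumLoopA fm sm (i + 1) j (result ++ [x])
    else if x.2.1 > y.2.1 then sumLoopA fm sm i (j + 1) (result ++ [y])
    else if x.2.2 + y.2.2 ≠ 0 then sumLoopA fm sm (i + 1) (j + 1) (result ++ [(x.1, x.2.1, x.2.2 + y.2.2)])
    else sumLoopA fm sm (i + 1) (j + 1) result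
  else sumTailA sm j (sumTailA fm i result)
termination_by (fm.length - i) + (sm.length - j)

def sum (firstMatrix : List (Int × Int × Int)) (secondMatrix : List (Int × Int × Int)) : List (Int × Int × Int) :=
  sumLoopA firstMatrix secondMatrix 0 0 []

-- ===== PORT B =====
-- the 'while n < len(entries) and (entries[n][0], entries[n][1]) < bound: n += 1' scan
def runLen : List (Int × Int × Int) → (Int ×ₗ Int) → Nat
  | [], _ => 0
  | e :: t, bound => if toLex (e.1, e.2.1) < bound then runLen t bound + 1 else 0

-- 'return entries[:n], entries[n:]'
def splitRun (entries : List (Int × Int × Int)) (bound : Int ×ₗ Int) :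
    List (Int × Int × Int) × List (Int × Int × Int) :=
  let n := runLen entries bound
  (PySem.List.slice entries none (some (n : Int)), PySem.List.slice entries (some (n : Int)) none)

-- one iteration of the 'for y in secondMatrix' loop over the state (out, rest)
def stepB (st : List (Int × Int × Int) × List (Int × Int × Int)) (y : Int × Int × Int) :
    List (Int × Int × Int) × List (Int × Int × Int) :=
  let yk : Int ×ₗ Int := toLex (y.1, y.2.1)
  let pr := splitRun st.2 yk
  let out := st.1 ++ pr.1
  match pr.2 with
  | x :: rest' =>
    if toLex (x.1, x.2.1) = yk then
      (if x.2.2 + y.2.2 ≠ 0 then out ++ [(y.1, y.2.1, x.2.2 + y.2.2)] else out,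
       PySem.List.slice (x :: rest') (some 1) none)
    else (out ++ [y], x :: rest')
  | [] => (out ++ [y], [])

def sum_alt (firstMatrix : List (Int × Int × Int)) (secondMatrix : List (Int × Int × Int)) : List (Int × Int × Int) :=
  let st := secondMatrix.foldl stepB ([], firstMatrix)
  st.1 ++ st.2

-- ===== PRECONDITION & SPEC =====
def Spec_sum (firstMatrix : List (Int × Int × Int)) (secondMatrix : List (Int × Int × Int)) (out : List (Int × Int × Int)) : Prop := out = sum_alt firstMatrix secondMatrix
instance (firstMatrix : List (Int × Int × Int)) (secondMatrix : List (Int × Int × Int)) (out : List (Int × Int × Int)) : Decidable (Spec_sum firstMatrix secondMatrix out) := by unfold Spec_sum; infer_instance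

-- ===== CLAIM =====
def Claim_equal_sum : Prop := ∀ (firstMatrix : List (Int × Int × Int)) (secondMatrix : List (Int × Int × Int)), Dom_sum firstMatrix secondMatrix → Spec_sum firstMatrix secondMatrix (sum firstMatrix secondMatrix)

-- ===== LEMMAS AND PROOFS =====

-- A's merge loop, proof-side structural form
def mergeB : List (Int × Int × Int) → List (Int × Int × Int) → List (Int × Int × Int)
  | [], ys => ys
  | x :: xs, [] => x :: xs
  | x :: xs, y :: ys =>
    if x.1 < y.1 ∨ (x.1 = y.1 ∧ x.2.1 < y.2.1) then x :: mergeB xs (y :: ys)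
    else if y.1 < x.1 ∨ (y.1 = x.1 ∧ y.2.1 < x.2.1) then y :: mergeB (x :: xs) ys
    else if x.2.2 + y.2.2 ≠ 0 then (x.1, x.2.1, x.2.2 + y.2.2) :: mergeB xs ys
    else mergeB xs ys

theorem sumTailA_eq (xs : List (Int × Int × Int)) (i : Nat) (result : List (Int × Int × Int)) :
    sumTailA xs i result = result ++ xs.drop i := by
  induction hn : xs.length - i using Nat.strong_induction_on generalizing i result with
  | _ n ih =>
    rw [sumTailA]
    split
    · next h =>
      rw [ih (xs.length - (i + 1)) (by omega) (i + 1) _ rfl]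
      rw [← List.getElem_cons_drop h, List.append_assoc]
      rfl
    · next h =>
      rw [List.drop_eq_nil_of_le (by omega), List.append_nil]

theorem mergeB_nil_right (xs : List (Int × Int × Int)) : mergeB xs [] = xs := by
  cases xs <;> simp [mergeB]

theorem sumLoopA_eq (fm sm : List (Int × Int × Int)) (i j : Nat) (result : List (Int × Int × Int)) :
    sumLoopA fm sm i j result = result ++ mergeB (fm.drop i) (sm.drop j) := by
  induction hn : (fm.length - i) + (sm.length - j) using Nat.strong_induction_on
    generalizing i j result with
  | _ n ih =>
    rw [sumLoopA]
    split
    · next h =>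
      obtain ⟨hi, hj⟩ := h
      have hdf : fm.drop i = fm[i] :: fm.drop (i + 1) := (List.getElem_cons_drop hi).symm
      have hds : sm.drop j = sm[j] :: sm.drop (j + 1) := (List.getElem_cons_drop hj).symm
      rw [hdf, hds, mergeB]
      set x := fm[i] with hx
      set y := sm[j] with hy
      by_cases h1 : x.1 < y.1
      · have hc1 : x.1 < y.1 ∨ (x.1 = y.1 ∧ x.2.1 < y.2.1) := Or.inl h1
        rw [if_pos h1, if_pos hc1, ih _ (by omega) (i + 1) j _ rfl, hds]
        simp
      · by_cases h2 : x.1 > y.1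
        · have hc1 : ¬ (x.1 < y.1 ∨ (x.1 = y.1 ∧ x.2.1 < y.2.1)) := by
            rintro (h | ⟨h, _⟩) <;> omega
          have hc2 : y.1 < x.1 ∨ (y.1 = x.1 ∧ y.2.1 < x.2.1) := Or.inl h2
          rw [if_neg h1, if_pos h2, if_neg hc1, if_pos hc2,
            ih _ (by omega) i (j + 1) _ rfl, hdf]
          simp
        · have heq : x.1 = y.1 := by omega
          by_cases h3 : x.2.1 < y.2.1
          · have hc1 : x.1 < y.1 ∨ (x.1 = y.1 ∧ x.2.1 < y.2.1) := Or.inr ⟨heq, h3⟩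
            rw [if_neg h1, if_neg h2, if_pos h3, if_pos hc1,
              ih _ (by omega) (i + 1) j _ rfl, hds]
            simp
          · by_cases h4 : x.2.1 > y.2.1
            · have hc1 : ¬ (x.1 < y.1 ∨ (x.1 = y.1 ∧ x.2.1 < y.2.1)) := by
                rintro (h | ⟨_, h⟩) <;> omega
              have hc2 : y.1 < x.1 ∨ (y.1 = x.1 ∧ y.2.1 < x.2.1) := Or.inr ⟨heq.symm, h4⟩
              rw [if_neg h1, if_neg h2, if_neg h3, if_pos h4, if_neg hc1, if_pos hc2,
                ih _ (by omega) i (j + 1) _ rfl, hdf]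
              simp
            · have hc1 : ¬ (x.1 < y.1 ∨ (x.1 = y.1 ∧ x.2.1 < y.2.1)) := by
                rintro (h | ⟨_, h⟩) <;> omega
              have hc2 : ¬ (y.1 < x.1 ∨ (y.1 = x.1 ∧ y.2.1 < x.2.1)) := by
                rintro (h | ⟨_, h⟩) <;> omega
              rw [if_neg h1, if_neg h2, if_neg h3, if_neg h4, if_neg hc1, if_neg hc2]
              by_cases h5 : x.2.2 + y.2.2 ≠ 0
              · rw [if_pos h5, if_pos h5, ih _ (by omega) (i + 1) (j + 1) _ rfl]
                simp
              · rw [if_neg h5, if_neg h5]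
                exact ih _ (by omega) (i + 1) (j + 1) _ rfl
    · next h =>
      rw [sumTailA_eq, sumTailA_eq, List.append_assoc]
      rcases Nat.lt_or_ge i fm.length with hi | hi
      · have hj : sm.length ≤ j := by omega
        rw [List.drop_eq_nil_of_le hj, mergeB_nil_right]
        simp
      · rw [List.drop_eq_nil_of_le hi]
        simp [mergeB]

theorem sum_eq_mergeB (fm sm : List (Int × Int × Int)) : sum fm sm = mergeB fm sm := by
  unfold sum
  rw [sumLoopA_eq]
  simp

-- B's step, slices resolved to take/drop/tail
def stepP (out fm : List (Int × Int × Int)) (y : Int × Int × Int) :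
    List (Int × Int × Int) × List (Int × Int × Int) :=
  let n := runLen fm (toLex (y.1, y.2.1))
  match fm.drop n with
  | x :: rest' =>
    if toLex (x.1, x.2.1) = toLex (y.1, y.2.1) then
      (if x.2.2 + y.2.2 ≠ 0 then out ++ fm.take n ++ [(y.1, y.2.1, x.2.2 + y.2.2)]
       else out ++ fm.take n, rest')
    else (out ++ fm.take n ++ [y], x :: rest')
  | [] => (out ++ fm.take n ++ [y], [])

theorem stepB_eq_stepP (out fm : List (Int × Int × Int)) (y : Int × Int × Int) :
    stepB (out, fm) y = stepP out fm y := by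
  simp only [stepB, splitRun, stepP, PySem.List.slice_to_natCast,
    PySem.List.slice_from_natCast, PySem.List.slice_from_one]
  cases hd : List.drop (runLen fm (toLex (y.1, y.2.1))) fm with
  | nil => simp
  | cons x rest' =>
    simp only []
    split_ifs <;> simp [List.append_assoc]

theorem stepP_out (out fm : List (Int × Int × Int)) (y : Int × Int × Int) :
    stepP out fm y = (out ++ (stepP [] fm y).1, (stepP [] fm y).2) := by
  simp only [stepP]
  cases hd : List.drop (runLen fm (toLex (y.1, y.2.1))) fm with
  | nil => simp
  | cons x rest' =>
    simp only []
    split_ifs <;> simp [List.append_assoc]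

-- one step of B performs exactly the next block of A's merge
theorem mergeB_step (fm : List (Int × Int × Int)) (y : Int × Int × Int)
    (ys : List (Int × Int × Int)) :
    mergeB fm (y :: ys) = (stepP [] fm y).1 ++ mergeB (stepP [] fm y).2 ys := by
  induction fm with
  | nil => simp [mergeB, stepP, runLen]
  | cons x t ihf =>
    by_cases hlt : toLex (x.1, x.2.1) < toLex (y.1, y.2.1)
    · have hraw : x.1 < y.1 ∨ (x.1 = y.1 ∧ x.2.1 < y.2.1) := Prod.Lex.toLex_lt_toLex.mp hlt
      have hn : runLen (x :: t) (toLex (y.1, y.2.1)) = runLen t (toLex (y.1, y.2.1)) + 1 := by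
        rw [runLen, if_pos hlt]
      have hstep : stepP [] (x :: t) y =
          (x :: (stepP [] t y).1, (stepP [] t y).2) := by
        simp only [stepP, hn, List.drop_succ_cons, List.take_succ_cons]
        cases hd : List.drop (runLen t (toLex (y.1, y.2.1))) t with
        | nil => simp
        | cons z r =>
          simp only []
          split_ifs <;> simp
      rw [mergeB, if_pos hraw, hstep, ihf]
      simp
    · have hn : runLen (x :: t) (toLex (y.1, y.2.1)) = 0 := by
        rw [runLen, if_neg hlt]
      by_cases he : toLex (x.1, x.2.1) = toLex (y.1, y.2.1)
      · have hk : x.1 = y.1 ∧ x.2.1 = y.2.1 :=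
          (Prod.mk.injEq _ _ _ _).mp (congrArg (fun p : Int ×ₗ Int => ofLex p) he)
        have hr1 : ¬ (x.1 < y.1 ∨ (x.1 = y.1 ∧ x.2.1 < y.2.1)) := by
          rintro (h | ⟨_, h⟩) <;> omega
        have hr2 : ¬ (y.1 < x.1 ∨ (y.1 = x.1 ∧ y.2.1 < x.2.1)) := by
          rintro (h | ⟨_, h⟩) <;> omega
        have hstep : stepP [] (x :: t) y =
            (if x.2.2 + y.2.2 ≠ 0 then [(y.1, y.2.1, x.2.2 + y.2.2)] else [], t) := by
          simp only [stepP, hn, List.drop_zero, List.take_zero]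
          rw [if_pos he]
          split_ifs <;> simp_all
        rw [mergeB, if_neg hr1, if_neg hr2, hstep]
        by_cases hz : x.2.2 + y.2.2 ≠ 0
        · rw [if_pos hz, if_pos hz, hk.1, hk.2]
          simp
        · rw [if_neg hz, if_neg hz]
          simp
      · have hgt : toLex (y.1, y.2.1) < toLex (x.1, x.2.1) := by
          rcases lt_trichotomy (toLex (x.1, x.2.1) : Int ×ₗ Int) (toLex (y.1, y.2.1)) with h | h | h
          · exact absurd h hlt
          · exact absurd h he
          · exact h
        have hraw2 : y.1 < x.1 ∨ (y.1 = x.1 ∧ y.2.1 < x.2.1) := Prod.Lex.toLex_lt_toLex.mp hgt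
        have hr1 : ¬ (x.1 < y.1 ∨ (x.1 = y.1 ∧ x.2.1 < y.2.1)) := by
          rintro (h | ⟨h', h⟩) <;> rcases hraw2 with h2 | ⟨h2', h2⟩ <;> omega
        have hstep : stepP [] (x :: t) y = ([y], x :: t) := by
          simp only [stepP, hn, List.drop_zero, List.take_zero]
          rw [if_neg he]
          simp
        rw [mergeB, if_neg hr1, if_pos hraw2, hstep]
        simp

theorem foldB_eq (sm : List (Int × Int × Int)) :
    ∀ (fm out : List (Int × Int × Int)),
      (sm.foldl stepB (out, fm)).1 ++ (sm.foldl stepB (out, fm)).2 = out ++ mergeB fm sm := by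
  induction sm with
  | nil =>
    intro fm out
    simp [mergeB_nil_right]
  | cons y ys ih =>
    intro fm out
    rw [List.foldl_cons, stepB_eq_stepP, stepP_out, ih, mergeB_step fm y ys]
    simp

-- ===== VERDICT =====
theorem sum_spec : Claim_equal_sum := by
  intro fm sm _
  unfold Spec_sum sum_alt
  rw [sum_eq_mergeB]
  have h := foldB_eq sm fm []
  simp only [List.nil_append] at h
  exact h.symm
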